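-- pv_equiv track=rewrite | github.com/mohammadfaiizan/ProjectI | DSA/Problem/Trie/05_Trie_Based_Dynamic_Programming/Advanced_String_Reconstruction.py | multi_source_reconstruction
-- ===== SOURCE A (Python) =====
-- from typing import List, Dict, Set, Tuple, Optional, Any
--
-- class TrieNode:
--     """Enhanced trie node for advanced reconstruction"""
--     def __init__(self):
--         self.children = {}
--         self.is_word = False
--         self.word = ""
--         self.frequency = 0
--         self.sources = set()  # Track sources that contributed this pattern
--         self.confidence = 1.0  # Confidence score for probabilistic reconstruction
--
-- def multi_source_reconstruction(sources: Dict[str, List[str]],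
--                               target_length: int) -> List[str]:
--     """
--     Approach 3: Multi-source String Reconstruction
--
--     Reconstruct strings from multiple sources with different patterns.
--
--     Time: O(s * n * m) where s=sources, n=strings per source, m=string length
--     Space: O(total_strings * m)
--     """
--     # Build multi-source trie
--     multi_root = TrieNode()
--
--     for source_id, strings in sources.items():
--         for string in strings:
--             node = multi_root
--             for char in string:
--                 if char not in node.children:
--                     node.children[char] = TrieNode()
--                 node = node.children[char]
--                 node.sources.add(source_id)
--
--             node.is_word = True
--             node.word = string
--             node.sources.add(source_id)
--
--     # Find strings that appear in multiple sources
--     def find_consensus_strings(min_sources: int = 2) -> List[Tuple[str, Set[str]]]: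
--         """Find strings supported by minimum number of sources"""
--         consensus = []
--
--         def dfs(node: TrieNode, path: str) -> None:
--             if node.is_word and len(node.sources) >= min_sources:
--                 if len(path) == target_length:
--                     consensus.append((path, node.sources.copy()))
--
--             if len(path) < target_length:
--                 for char, child in node.children.items():
--                     dfs(child, path + char)
--
--         dfs(multi_root, "")
--         return consensus
--
--     consensus_strings = find_consensus_strings()
--
--     # Rank by number of supporting sources
--     consensus_strings.sort(key=lambda x: len(x[1]), reverse=True)
--
--     return [string for string, sources in consensus_strings]
-- ===== SOURCE B (Python) =====
-- # Alternative structure: flat prefix-keyed dicts instead of a node-object trie, and an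
-- # iterative level-by-level (BFS) frontier expansion instead of recursive DFS; same output.
-- def multi_source_reconstruction(sources, target_length):
--     if target_length < 0:
--         return []
--     children = {"": []}   # prefix -> child characters in first-insertion order
--     words = set()         # strings that end a word
--     supp = {}             # prefix -> set of source ids having a string with that prefix
--     for source_id, strings in sources.items():
--         for s in strings:
--             for i, ch in enumerate(s):
--                 q = s[:i + 1]
--                 if q not in children:
--                     children[q] = []
--                     children[s[:i]].append(ch)
--                 supp.setdefault(q, set()).add(source_id)
--             words.add(s)
--             supp.setdefault(s, set()).add(source_id)
--     frontier = [""]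
--     k = target_length
--     while k > 0 and frontier:
--         frontier = [p + c for p in frontier for c in children.get(p, [])]
--         k -= 1
--     consensus = [(p, supp.get(p, set())) for p in frontier
--                  if p in words and len(supp.get(p, set())) >= 2]
--     consensus.sort(key=lambda x: len(x[1]), reverse=True)
--     return [p for p, _ in consensus]
-- ===== Notes on version B (the rewrite author's own statement) =====
-- stated objective: alternative
-- what changed: B replaces A's node-object trie plus recursive depth-first search by flat prefix-keyed dictionaries (children order, word set, support sets) and an iterative level-by-level frontier expansion with early exit; since all collected nodes lie at the same depth, level order coincides with A's preorder, and the same stable sort by support count gives the identical output.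
import Mathlib
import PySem

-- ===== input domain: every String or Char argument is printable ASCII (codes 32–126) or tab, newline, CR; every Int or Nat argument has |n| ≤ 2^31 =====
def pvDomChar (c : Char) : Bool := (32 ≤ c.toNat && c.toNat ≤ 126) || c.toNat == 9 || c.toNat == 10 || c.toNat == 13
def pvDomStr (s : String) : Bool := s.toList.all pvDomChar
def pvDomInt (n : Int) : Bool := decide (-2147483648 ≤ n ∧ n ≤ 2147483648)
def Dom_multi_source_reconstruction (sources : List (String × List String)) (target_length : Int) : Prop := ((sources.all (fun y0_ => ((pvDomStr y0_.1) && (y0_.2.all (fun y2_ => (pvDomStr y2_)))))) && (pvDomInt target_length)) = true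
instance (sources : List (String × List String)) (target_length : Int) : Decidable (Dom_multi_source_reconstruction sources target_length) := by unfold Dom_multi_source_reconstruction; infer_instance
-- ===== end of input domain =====

-- B replaces the node-object trie + recursive DFS of A by flat prefix-keyed dictionaries and an
-- iterative level-by-level frontier expansion; same return value (proved below).

-- The Python parameter `sources` is a dict; both ports view the association list through dict
-- semantics (duplicate keys: last value wins, first position kept), exactly `sources.items()`.
def pvItems (sources : List (String × List String)) : List (String × List String) :=
  (sources.foldl (fun (d : PySem.Dict String (List String)) kv => d.insert kv.1 kv.2) PySem.Dict.empty).items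

-- ===== PORT A =====
-- A's TrieNode trie is encoded as a dict keyed by the node's path (a trie node ↔ its prefix);
-- `children` holds the keys of the Python node's children dict in insertion order.
structure PVNode where
  children : List Char
  is_word : Bool
  word : List Char
  sources : PySem.Set String
deriving Repr, DecidableEq

def pvNode0 : PVNode := ⟨[], false, [], []⟩

-- one iteration of A's `for char in string` walk (state: the trie dict and the current node's path)
def pvStepA (sid : String) (st : PySem.Dict (List Char) PVNode × List Char) (c : Char) :
    PySem.Dict (List Char) PVNode × List Char :=
  let d := st.1
  let p := st.2
  let n := d.getD p pvNode0
  let d := if n.children.contains c then d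
           else (d.modify p pvNode0 (fun m => {m with children := m.children ++ [c]})).insert (p ++ [c]) pvNode0
  let d := d.modify (p ++ [c]) pvNode0 (fun m => {m with sources := PySem.Set.add m.sources sid})
  (d, p ++ [c])

-- insert one string: walk the characters, then mark the final node as a word
def pvAddStringA (sid : String) (d : PySem.Dict (List Char) PVNode) (s : List Char) :
    PySem.Dict (List Char) PVNode :=
  let st := s.foldl (pvStepA sid) (d, [])
  st.1.modify st.2 pvNode0 (fun m => {m with is_word := true, word := s, sources := PySem.Set.add m.sources sid})

def pvBuildA (items : List (String × List String)) : PySem.Dict (List Char) PVNode :=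
  items.foldl (fun d kv => kv.2.foldl (fun d s => pvAddStringA kv.1 d s.toList) d)
    (PySem.Dict.empty.insert [] pvNode0)

-- A's recursive dfs (min_sources = 2)
def pvDfsA (d : PySem.Dict (List Char) PVNode) (t : Int) (p : List Char) :
    List (List Char × PySem.Set String) :=
  let n := d.getD p pvNode0
  (if n.is_word && decide (2 ≤ n.sources.length) && decide ((p.length : Int) = t)
   then [(p, n.sources)] else []) ++
  (if h : (p.length : Int) < t then n.children.flatMap (fun c => pvDfsA d t (p ++ [c])) else [])
termination_by (t - p.length).toNat
decreasing_by simp [List.length_append]; omega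

def multi_source_reconstruction (sources : List (String × List String)) (target_length : Int) : List String :=
  let d := pvBuildA (pvItems sources)
  let consensus := pvDfsA d target_length []
  (PySem.List.sorted consensus (fun x => (x.2.length : Int)) true).map (fun x => String.ofList x.1)

-- ===== PORT B =====
-- one iteration of B's `for i, ch in enumerate(s)` (state: (children, supp) and the current prefix)
def pvStepB (sid : String)
    (st : (PySem.Dict (List Char) (List Char) × PySem.Dict (List Char) (PySem.Set String)) × List Char)
    (c : Char) :
    (PySem.Dict (List Char) (List Char) × PySem.Dict (List Char) (PySem.Set String)) × List Char :=
  let ch := st.1.1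
  let sp := st.1.2
  let p := st.2
  let q := p ++ [c]
  let ch := if ch.contains q then ch else (ch.insert q []).modify p [] (fun l => l ++ [c])
  let sp := sp.insert q (PySem.Set.add (sp.getD q []) sid)
  ((ch, sp), q)

def pvAddStringB (sid : String)
    (st : PySem.Dict (List Char) (List Char) × PySem.Set (List Char) × PySem.Dict (List Char) (PySem.Set String))
    (s : List Char) :
    PySem.Dict (List Char) (List Char) × PySem.Set (List Char) × PySem.Dict (List Char) (PySem.Set String) :=
  let r := s.foldl (pvStepB sid) ((st.1, st.2.2), [])
  (r.1.1, PySem.Set.add st.2.1 s, r.1.2.insert s (PySem.Set.add (r.1.2.getD s []) sid))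

def pvBuildB (items : List (String × List String)) :
    PySem.Dict (List Char) (List Char) × PySem.Set (List Char) × PySem.Dict (List Char) (PySem.Set String) :=
  items.foldl (fun st kv => kv.2.foldl (fun st s => pvAddStringB kv.1 st s.toList) st)
    (PySem.Dict.empty.insert [] [], [], PySem.Dict.empty)

def pvExpandB (ch : PySem.Dict (List Char) (List Char)) (f : List (List Char)) : List (List Char) :=
  f.flatMap (fun p => (ch.getD p []).map (fun c => p ++ [c]))

-- the `while k > 0 and frontier:` loop
def pvLevelsB (ch : PySem.Dict (List Char) (List Char)) : Nat → List (List Char) → List (List Char)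
  | 0, f => f
  | k+1, f => if f.isEmpty then f else pvLevelsB ch k (pvExpandB ch f)

-- the consensus list comprehension
def pvCollectB (w : PySem.Set (List Char)) (sp : PySem.Dict (List Char) (PySem.Set String))
    (f : List (List Char)) : List (List Char × PySem.Set String) :=
  f.filterMap (fun p =>
    if PySem.Set.contains w p && decide (2 ≤ (sp.getD p []).length)
    then some (p, sp.getD p []) else none)

def multi_source_reconstruction_alt (sources : List (String × List String)) (target_length : Int) : List String :=
  if target_length < 0 then [] else
  let st := pvBuildB (pvItems sources)
  let frontier := pvLevelsB st.1 target_length.toNat [[]]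
  let consensus := pvCollectB st.2.1 st.2.2 frontier
  (PySem.List.sorted consensus (fun x => (x.2.length : Int)) true).map (fun x => String.ofList x.1)

-- ===== PRECONDITION & SPEC =====
def Spec_multi_source_reconstruction (sources : List (String × List String)) (target_length : Int) (out : List String) : Prop := out = multi_source_reconstruction_alt sources target_length
instance (sources : List (String × List String)) (target_length : Int) (out : List String) : Decidable (Spec_multi_source_reconstruction sources target_length out) := by unfold Spec_multi_source_reconstruction; infer_instance

-- ===== CLAIM (what is proved, stated in full; the proofs are below) =====
def Claim_equal_multi_source_reconstruction : Prop := ∀ (sources : List (String × List String)) (target_length : Int), Dom_multi_source_reconstruction sources target_length → Spec_multi_source_reconstruction sources target_length (multi_source_reconstruction sources target_length)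

-- ===== LEMMAS AND PROOFS =====

-- Simulation relation between A's node dict and B's flat dicts.
def pvRel (d : PySem.Dict (List Char) PVNode) (ch : PySem.Dict (List Char) (List Char))
    (w : PySem.Set (List Char)) (sp : PySem.Dict (List Char) (PySem.Set String)) : Prop :=
  (∀ q, d.contains q = ch.contains q) ∧
  (∀ q, ch.contains q = true →
      (d.getD q pvNode0).children = ch.getD q [] ∧
      (d.getD q pvNode0).is_word = PySem.Set.contains w q ∧
      (d.getD q pvNode0).sources = sp.getD q []) ∧
  (∀ p c, (ch.getD p []).contains c = ch.contains (p ++ [c])) ∧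
  (∀ q, ch.contains q = false → sp.getD q [] = []) ∧
  (∀ q, ch.contains q = false → PySem.Set.contains w q = false)

lemma pvRel_init : pvRel (PySem.Dict.empty.insert [] pvNode0) (PySem.Dict.empty.insert [] []) [] PySem.Dict.empty := by
  refine ⟨?_, ?_, ?_, ?_, ?_⟩
  · intro q; simp [PySem.Dict.contains_insert, PySem.Dict.contains_empty]
  · intro q hq
    have hq' : q = [] := by
      simpa [PySem.Dict.contains_insert, PySem.Dict.contains_empty] using hq
    subst hq'
    simp [PySem.Dict.getD_insert, PySem.Dict.getD_empty, pvNode0, PySem.Set.contains]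
  · intro p c
    simp [PySem.Dict.getD_empty, PySem.Dict.getD_insert, PySem.Dict.contains_insert,
      PySem.Dict.contains_empty]
  · intro q _; simp [PySem.Dict.getD_empty]
  · intro q _; simp [PySem.Set.contains]


lemma pvStep_rel (sid : String) (c : Char)
    (d : PySem.Dict (List Char) PVNode) (ch : PySem.Dict (List Char) (List Char))
    (w : PySem.Set (List Char)) (sp : PySem.Dict (List Char) (PySem.Set String)) (p : List Char)
    (hrel : pvRel d ch w sp) (hp : ch.contains p = true) :
    pvRel (pvStepA sid (d, p) c).1 (pvStepB sid ((ch, sp), p) c).1.1 w (pvStepB sid ((ch, sp), p) c).1.2 ∧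
    (pvStepB sid ((ch, sp), p) c).1.1.contains (p ++ [c]) = true := by
  obtain ⟨R1, R2, R3, R4, R5⟩ := hrel
  have hdp : d.contains p = true := by rw [R1]; exact hp
  obtain ⟨hc, hw, hs⟩ := R2 p hp
  -- the two membership tests agree
  have hmem : (d.getD p pvNode0).children.contains c = ch.contains (p ++ [c]) := by
    rw [hc]; exact R3 p c
  simp only [pvStepA, pvStepB]
  by_cases hknown : ch.contains (p ++ [c]) = true
  · -- child already exists: A only adds the source, B only updates supp
    rw [hmem, hknown]
    simp only [eq_self_iff_true, if_true]
    refine ⟨⟨?_, ?_, ?_, ?_, ?_⟩, hknown⟩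
    · intro q; rw [PySem.Dict.contains_modify, R1]
      cases hq : q == (p ++ [c]) with
      | true => simp at hq; subst hq; simp [hknown]
      | false => simp [hq]
    · intro q hq
      by_cases hqe : q = p ++ [c]
      · subst hqe
        rw [PySem.Dict.getD_modify, PySem.Dict.getD_insert]
        simp only [eq_self_iff_true, if_true]
        obtain ⟨hc', hw', hs'⟩ := R2 _ hknown
        exact ⟨hc', hw', by rw [hs']⟩
      · rw [PySem.Dict.getD_modify, PySem.Dict.getD_insert, if_neg hqe, if_neg hqe]
        exact R2 q hq
    · exact R3
    · intro q hq
      have hne : q ≠ p ++ [c] := by rintro rfl; rw [hknown] at hq; exact absurd hq (by simp)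
      rw [PySem.Dict.getD_insert, if_neg hne]; exact R4 q hq
    · exact R5
  · -- new child: both create it
    replace hknown : ch.contains (p ++ [c]) = false := by simpa using hknown
    rw [hmem, hknown]
    simp only [Bool.false_eq_true, if_false]
    have hqp : p ++ [c] ≠ p := by simp
    have h4 := R4 _ hknown
    have h5 := R5 _ hknown
    refine ⟨⟨?_, ?_, ?_, ?_, ?_⟩, ?_⟩
    · intro q'
      simp only [PySem.Dict.contains_modify, PySem.Dict.contains_insert, R1]
      cases hq1 : q' == (p ++ [c]) <;> cases hq2 : q' == p <;> simp [hq1, hq2]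
    · intro q' hq'
      by_cases h1 : q' = p ++ [c]
      · subst h1
        simp [PySem.Dict.getD_modify, PySem.Dict.getD_insert, hqp, pvNode0, h4]
        simpa using h5
      · by_cases h2 : q' = p
        · rw [h2]
          have hne' : p ≠ p ++ [c] := fun h => hqp h.symm
          simp [PySem.Dict.getD_modify, PySem.Dict.getD_insert, hqp, hne', hc, hw, hs]
        · have : ch.contains q' = true := by
            revert hq'
            simp [PySem.Dict.contains_modify, PySem.Dict.contains_insert, h1, h2]
          obtain ⟨e1, e2, e3⟩ := R2 q' this
          simp [PySem.Dict.getD_modify, PySem.Dict.getD_insert, h1, h2, e1, e2, e3]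
    · intro p' c'
      by_cases h1 : p' = p
      · rw [h1]
        have hne' : p ≠ p ++ [c] := fun h => hqp h.symm
        simp only [PySem.Dict.getD_modify, PySem.Dict.getD_insert, PySem.Dict.contains_modify,
          PySem.Dict.contains_insert, if_neg hne', eq_self_iff_true, if_true]
        by_cases h2 : c' = c
        · simp [h2]
        · have hne2 : p ++ [c'] ≠ p ++ [c] := by simp [h2]
          have hne3 : p ++ [c'] ≠ p := by simp
          simp [h2, hne2]
          have b1 : (p ++ [c'] == p) = false := by simp
          have b2 : (c' == c) = false := by simp [h2]
          simp only [b1, b2, Bool.false_or]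
          simpa using R3 p c'
      · by_cases h2 : p' = p ++ [c]
        · rw [h2]
          have e0 : ch.getD (p ++ [c]) [] = [] := PySem.Dict.getD_of_not_contains _ _ hknown
          have e1 : ch.contains ((p ++ [c]) ++ [c']) = false := by
            rw [← R3, e0]; rfl
          have hne2 : (p ++ [c]) ++ [c'] ≠ p ++ [c] := by simp
          have hne3 : (p ++ [c]) ++ [c'] ≠ p := by
            intro h; apply_fun List.length at h; simp at h
          simp [PySem.Dict.getD_modify, PySem.Dict.getD_insert, PySem.Dict.contains_modify,
            PySem.Dict.contains_insert, hqp, e0, e1, hne2, hne3]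
          simpa using e1
        · have hne2 : p' ++ [c'] ≠ p ++ [c] := by
            intro h
            have := List.append_inj' h rfl
            exact h1 this.1
          rw [PySem.Dict.getD_modify, if_neg h1, PySem.Dict.getD_insert, if_neg h2,
            PySem.Dict.contains_modify, PySem.Dict.contains_insert, R3]
          have b2 : (p' == p) = false := by simp [h1]
          by_cases h3 : p' ++ [c'] = p
          · simp [h3, hp, b2]
          · have b1 : (p' ++ [c'] == p) = false := by simp [h3]
            simp [b1, b2]
    · intro q' hq'
      have h1 : q' ≠ p ++ [c] := by
        rintro rfl
        revert hq'
        simp [PySem.Dict.contains_modify, PySem.Dict.contains_insert]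
      have : ch.contains q' = false := by
        revert hq'
        simp only [PySem.Dict.contains_modify, PySem.Dict.contains_insert]
        cases hq1 : q' == (p ++ [c]) <;> cases hq2 : q' == p <;> simp [hq1, hq2]
      rw [PySem.Dict.getD_insert, if_neg h1]
      exact R4 q' this
    · intro q' hq'
      have : ch.contains q' = false := by
        revert hq'
        simp only [PySem.Dict.contains_modify, PySem.Dict.contains_insert]
        cases hq1 : q' == (p ++ [c]) <;> cases hq2 : q' == p <;> simp [hq1, hq2]
      exact R5 q' this
    · simp [PySem.Dict.contains_modify, PySem.Dict.contains_insert]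


lemma pvFold_rel (sid : String) (s : List Char)
    (d : PySem.Dict (List Char) PVNode) (ch : PySem.Dict (List Char) (List Char))
    (w : PySem.Set (List Char)) (sp : PySem.Dict (List Char) (PySem.Set String)) (p : List Char)
    (hrel : pvRel d ch w sp) (hp : ch.contains p = true) :
    pvRel (s.foldl (pvStepA sid) (d, p)).1 (s.foldl (pvStepB sid) ((ch, sp), p)).1.1 w
      (s.foldl (pvStepB sid) ((ch, sp), p)).1.2 ∧
    (s.foldl (pvStepA sid) (d, p)).2 = p ++ s ∧
    (s.foldl (pvStepB sid) ((ch, sp), p)).2 = p ++ s ∧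
    (s.foldl (pvStepB sid) ((ch, sp), p)).1.1.contains (p ++ s) = true := by
  induction s generalizing d ch sp p with
  | nil => simpa using ⟨hrel, hp⟩
  | cons c s ih =>
    obtain ⟨hrel', hq⟩ := pvStep_rel sid c d ch w sp p hrel hp
    have eA : pvStepA sid (d, p) c = ((pvStepA sid (d, p) c).1, p ++ [c]) := rfl
    have eB : pvStepB sid ((ch, sp), p) c =
        (((pvStepB sid ((ch, sp), p) c).1.1, (pvStepB sid ((ch, sp), p) c).1.2), p ++ [c]) := rfl
    have h := ih (pvStepA sid (d, p) c).1 (pvStepB sid ((ch, sp), p) c).1.1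
      (pvStepB sid ((ch, sp), p) c).1.2 (p ++ [c]) hrel' hq
    rw [List.foldl_cons, List.foldl_cons, eA, eB]
    simpa [List.append_assoc] using h


lemma pvStepB_contains_mono (sid : String) (c : Char)
    (ch : PySem.Dict (List Char) (List Char)) (sp : PySem.Dict (List Char) (PySem.Set String))
    (p x : List Char) (hx : ch.contains x = true) :
    (pvStepB sid ((ch, sp), p) c).1.1.contains x = true := by
  simp only [pvStepB]
  by_cases h : ch.contains (p ++ [c]) = true
  · simp [h, hx]
  · simp [h, PySem.Dict.contains_modify, PySem.Dict.contains_insert, hx]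

lemma pvFoldB_contains_mono (sid : String) (s : List Char)
    (ch : PySem.Dict (List Char) (List Char)) (sp : PySem.Dict (List Char) (PySem.Set String))
    (p x : List Char) (hx : ch.contains x = true) :
    (s.foldl (pvStepB sid) ((ch, sp), p)).1.1.contains x = true := by
  induction s generalizing ch sp p with
  | nil => simpa using hx
  | cons c s ih =>
    rw [List.foldl_cons]
    have eB : pvStepB sid ((ch, sp), p) c =
        (((pvStepB sid ((ch, sp), p) c).1.1, (pvStepB sid ((ch, sp), p) c).1.2), p ++ [c]) := rfl
    rw [eB]
    exact ih _ _ _ (pvStepB_contains_mono sid c ch sp p x hx)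

lemma pvAddString_rel (sid : String) (s : List Char)
    (d : PySem.Dict (List Char) PVNode) (ch : PySem.Dict (List Char) (List Char))
    (w : PySem.Set (List Char)) (sp : PySem.Dict (List Char) (PySem.Set String))
    (hrel : pvRel d ch w sp) (hroot : ch.contains [] = true) :
    pvRel (pvAddStringA sid d s) (pvAddStringB sid (ch, w, sp) s).1
      (pvAddStringB sid (ch, w, sp) s).2.1 (pvAddStringB sid (ch, w, sp) s).2.2 ∧
    (pvAddStringB sid (ch, w, sp) s).1.contains [] = true := by
  obtain ⟨hrel', he1, he2, hs⟩ := pvFold_rel sid s d ch w sp [] hrel hroot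
  simp only [List.nil_append] at he1 he2 hs
  obtain ⟨R1, R2, R3, R4, R5⟩ := hrel'
  simp only [pvAddStringA, pvAddStringB, he1, he2]
  have hroot' : (s.foldl (pvStepB sid) ((ch, sp), [])).1.1.contains [] = true :=
    pvFoldB_contains_mono sid s ch sp [] [] hroot
  refine ⟨⟨?_, ?_, ?_, ?_, ?_⟩, hroot'⟩
  · intro q
    rw [PySem.Dict.contains_modify]
    cases hq : q == s with
    | true => simp at hq; subst hq; simp [hs]
    | false => simp [R1]
  · intro q hq
    by_cases h1 : q = s
    · subst h1
      obtain ⟨e1, e2, e3⟩ := R2 q hs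
      rw [PySem.Dict.getD_modify, PySem.Dict.getD_insert]
      simp only [eq_self_iff_true, if_true]
      refine ⟨e1, ?_, by rw [e3]⟩
      simp [PySem.Set.contains, PySem.Set.mem_add]
    · obtain ⟨e1, e2, e3⟩ := R2 q hq
      rw [PySem.Dict.getD_modify, if_neg h1, PySem.Dict.getD_insert, if_neg h1]
      refine ⟨e1, ?_, e3⟩
      rw [e2]
      simp [PySem.Set.contains, PySem.Set.mem_add, h1]
  · exact R3
  · intro q hq
    have h1 : q ≠ s := by rintro rfl; rw [hs] at hq; exact absurd hq (by simp)
    rw [PySem.Dict.getD_insert, if_neg h1]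
    exact R4 q hq
  · intro q hq
    have h1 : q ≠ s := by rintro rfl; rw [hs] at hq; exact absurd hq (by simp)
    rw [← R5 q hq]
    simp [PySem.Set.contains, PySem.Set.mem_add, h1]


lemma pvFoldl_rel_aux {α β γ : Type} (R : α → β → Prop) (fA : α → γ → α) (fB : β → γ → β)
    (h : ∀ a b x, R a b → R (fA a x) (fB b x)) :
    ∀ (l : List γ) (a : α) (b : β), R a b → R (l.foldl fA a) (l.foldl fB b) := by
  intro l
  induction l with
  | nil => intro a b hr; simpa using hr
  | cons x xs ih => intro a b hr; rw [List.foldl_cons, List.foldl_cons]; exact ih _ _ (h a b x hr)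

lemma pvBuild_rel (items : List (String × List String)) :
    pvRel (pvBuildA items) (pvBuildB items).1 (pvBuildB items).2.1 (pvBuildB items).2.2 ∧
    (pvBuildB items).1.contains [] = true := by
  have base : (fun (d : PySem.Dict (List Char) PVNode)
      (st : PySem.Dict (List Char) (List Char) × PySem.Set (List Char) × PySem.Dict (List Char) (PySem.Set String)) =>
        pvRel d st.1 st.2.1 st.2.2 ∧ st.1.contains [] = true)
      (PySem.Dict.empty.insert [] pvNode0) (PySem.Dict.empty.insert [] [], [], PySem.Dict.empty) :=
    ⟨pvRel_init, by simp [PySem.Dict.contains_insert]⟩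
  exact pvFoldl_rel_aux
    (fun d st => pvRel d st.1 st.2.1 st.2.2 ∧ st.1.contains [] = true)
    (fun d kv => kv.2.foldl (fun d s => pvAddStringA kv.1 d s.toList) d)
    (fun st kv => kv.2.foldl (fun st s => pvAddStringB kv.1 st s.toList) st)
    (by
      intro d st kv hr
      exact pvFoldl_rel_aux
        (fun d st => pvRel d st.1 st.2.1 st.2.2 ∧ st.1.contains [] = true)
        (fun d s => pvAddStringA kv.1 d s.toList)
        (fun st s => pvAddStringB kv.1 st s.toList)
        (by
          intro d st s hr
          have := pvAddString_rel kv.1 s.toList d st.1 st.2.1 st.2.2 hr.1 hr.2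
          exact ⟨this.1, this.2⟩)
        kv.2 d st hr)
    items _ _ base


-- level expansion without the early-exit test
def pvExpandIter (ch : PySem.Dict (List Char) (List Char)) : Nat → List (List Char) → List (List Char)
  | 0, f => f
  | k+1, f => pvExpandIter ch k (pvExpandB ch f)

lemma pvExpandIter_nil (ch : PySem.Dict (List Char) (List Char)) (k : Nat) :
    pvExpandIter ch k [] = [] := by
  induction k with
  | zero => rfl
  | succ k ih => simpa [pvExpandIter, pvExpandB] using ih

lemma pvLevelsB_eq (ch : PySem.Dict (List Char) (List Char)) (k : Nat) (f : List (List Char)) :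
    pvLevelsB ch k f = pvExpandIter ch k f := by
  induction k generalizing f with
  | zero => rfl
  | succ k ih =>
    by_cases h : f = []
    · simp [pvLevelsB, pvExpandIter, h, pvExpandB, pvExpandIter_nil]
    · simp [pvLevelsB, pvExpandIter, h, ih]

lemma pvExpandIter_append (ch : PySem.Dict (List Char) (List Char)) (k : Nat)
    (f g : List (List Char)) :
    pvExpandIter ch k (f ++ g) = pvExpandIter ch k f ++ pvExpandIter ch k g := by
  induction k generalizing f g with
  | zero => rfl
  | succ k ih => simp [pvExpandIter, pvExpandB, ih]

lemma pvCollectB_append (w : PySem.Set (List Char)) (sp : PySem.Dict (List Char) (PySem.Set String))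
    (f g : List (List Char)) :
    pvCollectB w sp (f ++ g) = pvCollectB w sp f ++ pvCollectB w sp g := by
  simp [pvCollectB]

lemma pvCollect_expandIter_flat (ch : PySem.Dict (List Char) (List Char))
    (w : PySem.Set (List Char)) (sp : PySem.Dict (List Char) (PySem.Set String)) (k : Nat)
    (l : List (List Char)) :
    pvCollectB w sp (pvExpandIter ch k l) =
      l.flatMap (fun p => pvCollectB w sp (pvExpandIter ch k [p])) := by
  induction l with
  | nil => simp [pvExpandIter_nil, pvCollectB]
  | cons x xs ih =>
    have : x :: xs = [x] ++ xs := rfl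
    rw [this, pvExpandIter_append, pvCollectB_append, ih]
    simp

lemma pvDfs_eq (d : PySem.Dict (List Char) PVNode) (ch : PySem.Dict (List Char) (List Char))
    (w : PySem.Set (List Char)) (sp : PySem.Dict (List Char) (PySem.Set String)) (t : Int)
    (hrel : pvRel d ch w sp) :
    ∀ (k : Nat) (p : List Char), ch.contains p = true → (p.length : Int) + k = t →
      pvDfsA d t p = pvCollectB w sp (pvExpandIter ch k [p]) := by
  obtain ⟨R1, R2, R3, R4, R5⟩ := hrel
  intro k
  induction k with
  | zero =>
    intro p hp hlen
    obtain ⟨e1, e2, e3⟩ := R2 p hp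
    rw [pvDfsA]
    simp only [pvExpandIter, pvCollectB, List.filterMap_cons, List.filterMap_nil]
    rw [dif_neg (by omega : ¬ (p.length : Int) < t)]
    rw [e2, e3]
    have hd : decide ((p.length : Int) = t) = true := by simp; omega
    simp only [hd, Bool.and_true]
    cases h : (w.contains p && decide (2 ≤ (sp.getD p []).length)) <;> simp [h]
  | succ k ih =>
    intro p hp hlen
    obtain ⟨e1, e2, e3⟩ := R2 p hp
    rw [pvDfsA]
    rw [if_neg (by simp; omega : ¬ ((d.getD p pvNode0).is_word &&
      decide (2 ≤ (d.getD p pvNode0).sources.length) && decide ((p.length : Int) = t)) = true)]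
    rw [dif_pos (by omega : (p.length : Int) < t)]
    have eexp : pvExpandIter ch (k + 1) [p] = pvExpandIter ch k ((ch.getD p []).map (fun c => p ++ [c])) := by
      simp [pvExpandIter, pvExpandB]
    rw [eexp, ← e1]
    rw [pvCollect_expandIter_flat]
    rw [List.flatMap_map]
    simp only [List.nil_append]
    refine (List.flatMap_congr ?_).symm
    intro c hc
    have hc' : ch.contains (p ++ [c]) = true := by
      rw [← R3]
      rw [← e1]
      simpa using hc
    rw [ih (p ++ [c]) hc' (by simp; omega)]


lemma pvDfs_neg (d : PySem.Dict (List Char) PVNode) (t : Int) (ht : t < 0) :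
    pvDfsA d t [] = [] := by
  rw [pvDfsA]
  simp
  omega

-- ===== VERDICT (by name: the statement is the Claim_ definition above) =====
theorem multi_source_reconstruction_spec : Claim_equal_multi_source_reconstruction := by
  intro sources t _
  unfold Spec_multi_source_reconstruction
  unfold multi_source_reconstruction multi_source_reconstruction_alt
  obtain ⟨hrel, hroot⟩ := pvBuild_rel (pvItems sources)
  by_cases ht : t < 0
  · simp [ht, pvDfs_neg _ _ ht, PySem.List.sorted]
  · simp only [if_neg ht]
    rw [pvLevelsB_eq]
    rw [pvDfs_eq _ _ _ _ t hrel t.toNat [] hroot (by simp; omega)]
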